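-- pv_equiv track=rewrite | github.com/MrKelvic/netAutomation | functions/filter.py | regroupArray
-- ===== SOURCE A (Python) =====
-- def regroupArray(arr,lim,strin):
--     ret=[]
--     temp=[]
--     for item in arr:
--         if len(temp) > lim:
--             ret.append(strin.join(temp))
--             temp=[]
--         else:
--             temp.append(item)
--     if (len(temp)<lim+1) and (len(temp)>0):
--         ret.append(strin.join(temp))
--     return ret
-- ===== SOURCE B (Python) =====
-- def regroupArray(arr, lim, strin):
--     period = lim + 2
--     ret = []
--     for start in range(0, len(arr), period):
--         group = arr[start:start + lim + 1]
--         if start + period <= len(arr) or len(group) <= lim: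
--             ret.append(strin.join(group))
--     return ret
-- ===== Notes on version B (the rewrite author's own statement) =====
-- stated objective: alternative
-- what changed: Replaces A's item-by-item accumulator state machine (temp/ret with a flush-on-overflow branch) by arithmetic chunking: iterate start over range(0, len(arr), lim+2) and join the slice arr[start:start+lim+1] when a full period remains or the trailing group is shorter than lim+1; Pre_ excludes lim <= -2 (a meaningless negative group size) where B's range step is non-positive.
-- outside the precondition, e.g. on regroupArray(['x', 'y'], -2, '-'): A returns ['', ''], B raises ValueError; on regroupArray(['x'], -3, '-'): A returns [''], B returns []
import Mathlib
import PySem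

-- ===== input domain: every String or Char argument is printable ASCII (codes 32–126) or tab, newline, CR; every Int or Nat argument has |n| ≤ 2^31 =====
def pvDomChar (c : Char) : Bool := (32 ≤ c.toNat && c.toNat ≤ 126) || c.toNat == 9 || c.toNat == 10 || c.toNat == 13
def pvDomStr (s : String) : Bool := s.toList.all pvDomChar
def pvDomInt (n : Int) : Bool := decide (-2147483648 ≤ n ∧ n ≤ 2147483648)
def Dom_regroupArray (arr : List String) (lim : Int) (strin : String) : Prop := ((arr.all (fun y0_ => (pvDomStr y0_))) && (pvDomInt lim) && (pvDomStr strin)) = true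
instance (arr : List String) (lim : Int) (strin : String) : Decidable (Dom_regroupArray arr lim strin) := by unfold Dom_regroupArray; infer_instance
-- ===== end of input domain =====

-- B replaces A's item-by-item accumulator state machine by arithmetic chunking over range(0, len, lim+2); alternative decomposition, same cost.

-- ===== PORT A =====
-- loop body of A's 'for item in arr' over the state (ret, temp)
def stepA (lim : Int) (strin : String) (s : List String × List String) (item : String) : List String × List String :=
  if (s.2.length : Int) > lim then (s.1 ++ [PySem.Str.join strin s.2], ([] : List String))
  else (s.1, s.2 ++ [item])

def regroupArray (arr : List String) (lim : Int) (strin : String) : List String :=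
  let st := arr.foldl (stepA lim strin) (([] : List String), ([] : List String))
  if (st.2.length : Int) < lim + 1 ∧ 0 < (st.2.length : Int) then st.1 ++ [PySem.Str.join strin st.2] else st.1

-- ===== PORT B =====
-- body of Source B's 'for start in range(0, len(arr), period)' (period = lim+2)
def bodyB (arr : List String) (lim : Int) (strin : String) (ret : List String) (start : Int) : List String :=
  let group := PySem.List.slice arr (some start) (some (start + lim + 1))
  if start + (lim + 2) ≤ (arr.length : Int) ∨ (group.length : Int) ≤ lim then
    ret ++ [PySem.Str.join strin group]
  else ret

def regroupArray_alt (arr : List String) (lim : Int) (strin : String) : List String :=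
  (PySem.List.pyRange 0 (arr.length : Int) (lim + 2)).foldl (bodyB arr lim strin) []

-- ===== PRECONDITION & SPEC =====
-- Pre_ excludes lim ≤ -2 — a meaningless negative group size nobody would pass: there B's
-- 'range(0, len(arr), lim+2)' raises ValueError (lim = -2) or yields no indices (lim ≤ -3,
-- empty result), while A happens to return one empty string per item.
def Pre_regroupArray (arr : List String) (lim : Int) (strin : String) : Prop := -1 ≤ lim
instance (arr : List String) (lim : Int) (strin : String) : Decidable (Pre_regroupArray arr lim strin) := by unfold Pre_regroupArray; infer_instance

def pvWitness_regroupArray : List String × Int × String := (["ab", "c", "d", "e", "fg"], 1, "-")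

def Spec_regroupArray (arr : List String) (lim : Int) (strin : String) (out : List String) : Prop := out = regroupArray_alt arr lim strin
instance (arr : List String) (lim : Int) (strin : String) (out : List String) : Decidable (Spec_regroupArray arr lim strin out) := by unfold Spec_regroupArray; infer_instance

-- ===== CLAIM (what is proved, stated in full; the proofs are below) =====
def Claim_equal_regroupArray : Prop := ∀ (arr : List String) (lim : Int) (strin : String), Dom_regroupArray arr lim strin → Pre_regroupArray arr lim strin → Spec_regroupArray arr lim strin (regroupArray arr lim strin)

-- ===== LEMMAS AND PROOFS =====

-- pyRange with a positive step, structurally: empty and cons forms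
lemma pvRange_nil (a b p : Int) (hp : 0 < p) (hab : b ≤ a) :
    PySem.List.pyRange a b p = [] := by
  rw [PySem.List.pyRange_of_pos _ _ hp, if_neg (by omega)]
  simp

lemma pvRange_cons (a b p : Int) (hp : 0 < p) (hab : a < b) :
    PySem.List.pyRange a b p = a :: PySem.List.pyRange (a + p) b p := by
  rw [PySem.List.pyRange_of_pos _ _ hp, PySem.List.pyRange_of_pos _ _ hp, if_pos hab]
  have hkey : (b - a + p - 1) / p = (b - (a + p) + p - 1) / p + 1 := by
    have h := Int.add_mul_ediv_right (b - (a + p) + p - 1) 1 (ne_of_gt hp)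
    rw [one_mul] at h
    rw [show b - a + p - 1 = b - (a + p) + p - 1 + p by ring]
    exact h
  by_cases h2 : a + p < b
  · rw [if_pos h2, hkey]
    have hq : 0 ≤ (b - (a + p) + p - 1) / p := Int.ediv_nonneg (by omega) hp.le
    rw [show ((b - (a + p) + p - 1) / p + 1).toNat = ((b - (a + p) + p - 1) / p).toNat + 1 by omega]
    rw [List.range_succ_eq_map]
    simp only [List.map_cons, List.map_map, Nat.cast_zero, mul_zero, add_zero]
    refine congrArg (List.cons a) (List.map_congr_left fun k _ => ?_)
    simp only [Function.comp_apply]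
    push_cast
    ring
  · rw [if_neg h2]
    have h0 : (b - (a + p) + p - 1) / p = 0 := Int.ediv_eq_zero_of_lt (by omega) (by omega)
    rw [hkey, h0]
    norm_num

-- shifting a positive-step range by one step
lemma pvRange_shift (m p : Int) (hp : 0 < p) :
    PySem.List.pyRange p (m + p) p = (PySem.List.pyRange 0 m p).map (· + p) := by
  rw [PySem.List.pyRange_of_pos _ _ hp, PySem.List.pyRange_of_pos _ _ hp, List.map_map]
  have hiff : p < m + p ↔ 0 < m := by omega
  rw [show m + p - p + p - 1 = m - 0 + p - 1 by ring, if_congr hiff rfl rfl]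
  exact List.map_congr_left fun k _ => by simp only [Function.comp_apply]; ring

-- chunk recursion equivalent to B's indexed loop (proof-only helper)
def loopB (lim p : Int) (hp : 0 < p) (strin : String) (ret arr : List String) : List String :=
  match arr with
  | [] => ret
  | x :: xs =>
      loopB lim p hp strin
        (if p ≤ ((x :: xs).length : Int) ∨ (((x :: xs).take (lim + 1).toNat).length : Int) ≤ lim then
           ret ++ [PySem.Str.join strin ((x :: xs).take (lim + 1).toNat)]
         else ret)
        ((x :: xs).drop p.toNat)
termination_by arr.length
decreasing_by
  simp only [List.length_drop, List.length_cons]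
  omega

-- B's foldl over pyRange equals the chunk recursion
lemma foldlB_eq_loopB (lim : Int) (hl : -1 ≤ lim) (strin : String) :
    ∀ (n : Nat) (arr : List String), arr.length ≤ n → ∀ ret : List String,
      (PySem.List.pyRange 0 (arr.length : Int) (lim + 2)).foldl (bodyB arr lim strin) ret =
        loopB lim (lim + 2) (by omega) strin ret arr := by
  have hp : (0 : Int) < lim + 2 := by omega
  intro n
  induction n with
  | zero =>
      intro arr h ret
      rw [List.length_eq_zero_iff.mp (Nat.le_zero.mp h)]
      simp only [List.length_nil, Nat.cast_zero]
      rw [pvRange_nil 0 0 _ hp le_rfl]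
      simp [loopB]
  | succ n ih =>
      intro arr hlen ret
      cases arr with
      | nil =>
          simp only [List.length_nil, Nat.cast_zero]
          rw [pvRange_nil 0 0 _ hp le_rfl]
          simp [loopB]
      | cons x xs =>
        have hL1 : (1 : Int) ≤ ((x :: xs).length : Int) := by
          simp only [List.length_cons]; push_cast; omega
        rw [pvRange_cons 0 ((x :: xs).length : Int) (lim + 2) hp (by omega), List.foldl_cons,
            zero_add]
        have hbody0 : bodyB (x :: xs) lim strin ret 0 =
            (if lim + 2 ≤ ((x :: xs).length : Int) ∨
                (((x :: xs).take (lim + 1).toNat).length : Int) ≤ lim then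
               ret ++ [PySem.Str.join strin ((x :: xs).take (lim + 1).toNat)]
             else ret) := by
          simp only [bodyB, zero_add]
          rw [PySem.List.slice_toNat _ le_rfl (by omega)]
          simp only [Int.toNat_zero, List.drop_zero, Nat.sub_zero]
        rw [hbody0, loopB]
        by_cases hbig : lim + 2 ≤ ((x :: xs).length : Int)
        · -- a full period remains: shift the range and recurse on the dropped list
          have hdlen : (((x :: xs).drop (lim + 2).toNat).length : Int)
              = ((x :: xs).length : Int) - (lim + 2) := by
            simp only [List.length_drop, List.length_cons] at *
            push_cast at *
            omega
          have hsplit := pvRange_shift (((x :: xs).length : Int) - (lim + 2)) (lim + 2) hp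
          rw [show ((x :: xs).length : Int) - (lim + 2) + (lim + 2) = ((x :: xs).length : Int)
                by ring] at hsplit
          rw [hsplit, List.foldl_map]
          have hcong : ∀ (acc : List String) (k : Int),
              k ∈ PySem.List.pyRange 0 (((x :: xs).length : Int) - (lim + 2)) (lim + 2) →
              bodyB (x :: xs) lim strin acc (k + (lim + 2)) =
                bodyB ((x :: xs).drop (lim + 2).toNat) lim strin acc k := by
            intro acc k hk
            have hk0 : 0 ≤ k := ((PySem.List.mem_pyRange_iff_of_pos hp k).mp hk).1
            have hgroup : PySem.List.slice (x :: xs) (some (k + (lim + 2)))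
                  (some (k + (lim + 2) + lim + 1)) =
                PySem.List.slice ((x :: xs).drop (lim + 2).toNat) (some k) (some (k + lim + 1)) := by
              rw [PySem.List.slice_toNat _ (by omega) (by omega),
                  PySem.List.slice_toNat _ (by omega) (by omega), List.drop_drop]
              congr 1
              · omega
              · congr 1
                omega
            simp only [bodyB]
            rw [hgroup]
            have hcond : (k + (lim + 2) + (lim + 2) ≤ ((x :: xs).length : Int)) ↔
                (k + (lim + 2) ≤ (((x :: xs).drop (lim + 2).toNat).length : Int)) := by
              rw [hdlen]; omega
            rw [if_congr (or_congr hcond Iff.rfl) rfl rfl]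
          rw [PySem.List.foldl_congr_mem _ _ _ _ hcong, ← hdlen]
          refine ih _ ?_ _
          simp only [List.length_drop, List.length_cons] at *
          omega
        · -- no full period left: the remaining range is empty and the drop is empty
          have hrest : PySem.List.pyRange (lim + 2) ((x :: xs).length : Int) (lim + 2) = [] :=
            pvRange_nil _ _ _ hp (by omega)
          have hdrop : (x :: xs).drop (lim + 2).toNat = [] := by
            refine List.drop_eq_nil_of_le ?_
            simp only [List.length_cons] at *
            push_cast at hbig
            omega
          rw [hrest, hdrop, List.foldl_nil, loopB]

-- A's loop followed by the trailing-temp append, from a general accumulator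
def runA (lim : Int) (strin : String) (ret arr : List String) : List String :=
  let st := arr.foldl (stepA lim strin) (ret, ([] : List String))
  if (st.2.length : Int) < lim + 1 ∧ 0 < (st.2.length : Int) then st.1 ++ [PySem.Str.join strin st.2] else st.1

lemma regroupArray_eq_runA (arr : List String) (lim : Int) (strin : String) :
    regroupArray arr lim strin = runA lim strin [] arr := rfl

-- While temp stays within the limit, A's loop only accumulates into temp.
lemma foldl_stepA_small (lim : Int) (strin : String) :
    ∀ (arr temp ret : List String), (temp.length : Int) + (arr.length : Int) ≤ lim + 1 →
      arr.foldl (stepA lim strin) (ret, temp) = (ret, temp ++ arr) := by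
  intro arr
  induction arr with
  | nil => intro temp ret _; simp
  | cons x xs ih =>
      intro temp ret h
      simp only [List.foldl_cons, List.length_cons] at *
      rw [show stepA lim strin (ret, temp) x = (ret, temp ++ [x]) from by
        simp only [stepA]; rw [if_neg (by push_cast at h ⊢; omega)]]
      rw [ih (temp ++ [x]) ret (by simp; push_cast at h ⊢; omega)]
      simp

-- A full chunk of lim+2 items: the first lim+1 accumulate, the next flushes (and is dropped).
lemma foldl_stepA_chunk (lim : Int) (hl : -1 ≤ lim) (strin : String) (c ret : List String)
    (hc : c.length = (lim + 2).toNat) :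
    c.foldl (stepA lim strin) (ret, []) =
      (ret ++ [PySem.Str.join strin (c.take (lim + 1).toNat)], []) := by
  obtain ⟨y, hy⟩ : ∃ y, c.drop (lim + 1).toNat = [y] :=
    List.length_eq_one_iff.mp (by rw [List.length_drop]; omega)
  have htk : (c.take (lim + 1).toNat).length = (lim + 1).toNat := by
    rw [List.length_take]; omega
  conv_lhs => rw [← List.take_append_drop (lim + 1).toNat c, hy]
  rw [List.foldl_append, foldl_stepA_small lim strin (c.take (lim + 1).toNat) [] ret
      (by simp only [List.length_nil, htk]; push_cast; omega)]
  simp only [List.nil_append, List.foldl_cons, List.foldl_nil]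
  rw [show stepA lim strin (ret, c.take (lim + 1).toNat) y
        = (ret ++ [PySem.Str.join strin (c.take (lim + 1).toNat)], []) from by
    simp only [stepA]; rw [if_pos (by rw [htk]; omega)]]

-- A equals the chunk recursion, by strong induction on the list length.
lemma runA_eq_loopB (lim : Int) (hl : -1 ≤ lim) (strin : String) :
    ∀ (n : Nat) (arr : List String), arr.length ≤ n → ∀ ret : List String,
      runA lim strin ret arr = loopB lim (lim + 2) (by omega) strin ret arr := by
  intro n
  induction n with
  | zero =>
      intro arr h ret
      rw [List.length_eq_zero_iff.mp (Nat.le_zero.mp h)]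
      simp [runA, loopB]
  | succ n ih =>
      intro arr hlen ret
      cases arr with
      | nil => simp [runA, loopB]
      | cons x xs =>
        simp only [List.length_cons] at hlen
        by_cases hsmall : ((x :: xs).length : Int) ≤ lim + 1
        · -- the whole remaining list fits into temp
          have hsl : ((xs.length : Int)) + 1 ≤ lim + 1 := by simpa using hsmall
          have htake : (x :: xs).take (lim + 1).toNat = x :: xs :=
            List.take_of_length_le (by simp only [List.length_cons]; omega)
          have hdrop : (x :: xs).drop (lim + 2).toNat = [] :=
            List.drop_eq_nil_of_le (by simp only [List.length_cons]; omega)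
          rw [runA]
          rw [foldl_stepA_small lim strin (x :: xs) [] ret
              (by simp only [List.length_nil, List.length_cons]; push_cast; omega)]
          rw [loopB, hdrop, loopB, htake]
          simp only [List.nil_append]
          by_cases heq : ((x :: xs).length : Int) = lim + 1
          · rw [if_neg (by omega), if_neg (by simp only [List.length_cons] at heq ⊢; push_cast at heq ⊢; omega)]
          · have heq' : ((xs.length : Int)) + 1 ≠ lim + 1 := by simpa using heq
            rw [if_pos (by simp only [List.length_cons]; push_cast; omega),
                if_pos (by right; simp only [List.length_cons] at *; push_cast at *; omega)]
        · -- a full chunk of lim+2 items is consumed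
          have hbig : (lim + 2).toNat ≤ xs.length + 1 := by
            have := lt_of_not_ge hsmall
            simp only [List.length_cons] at this
            push_cast at this
            omega
          set c := (x :: xs).take (lim + 2).toNat with hc
          set rest := (x :: xs).drop (lim + 2).toNat with hr
          have hclen : c.length = (lim + 2).toNat := by
            rw [hc, List.length_take]; simp only [List.length_cons]; omega
          have htt : (x :: xs).take (lim + 1).toNat = c.take (lim + 1).toNat := by
            rw [hc, List.take_take, min_eq_left (by omega)]
          have hrestlen : rest.length ≤ n := by
            rw [hr, List.length_drop]; simp only [List.length_cons]; omega
          rw [runA]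
          conv_lhs => rw [show x :: xs = c ++ rest from (List.take_append_drop _ _).symm]
          rw [List.foldl_append, foldl_stepA_chunk lim hl strin c ret hclen]
          have hrec := ih rest hrestlen (ret ++ [PySem.Str.join strin (c.take (lim + 1).toNat)])
          rw [runA] at hrec
          rw [hrec, loopB, htt]
          rw [if_pos (by left; simp only [List.length_cons]; push_cast; omega)]

-- ===== VERDICT (by name: the statement is the Claim_ definition above) =====
theorem regroupArray_spec : Claim_equal_regroupArray := by
  intro arr lim strin _ hpre
  have hl : -1 ≤ lim := hpre
  unfold Spec_regroupArray
  rw [regroupArray_eq_runA, regroupArray_alt,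
      foldlB_eq_loopB lim hl strin arr.length arr le_rfl [],
      runA_eq_loopB lim hl strin arr.length arr le_rfl []]
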